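-- pv_equiv track=rewrite | github.com/huqa/project-euler | p21-p30/p24/p24.py | find_largest_index_k
-- ===== SOURCE A (Python) =====
-- def find_largest_index_k(permutation):
--     k = 0
--     largest_k = -1
--     while k < len(permutation):
--         if k == len(permutation)-1:
--             return largest_k
--         if permutation[k] < permutation[k+1]:
--             largest_k = k
--         k = k + 1
-- ===== SOURCE B (Python) =====
-- def find_largest_index_k(permutation):
--     for k in range(len(permutation) - 2, -1, -1):
--         if permutation[k] < permutation[k + 1]:
--             return k
--     return -1
-- ===== Notes on version B (the rewrite author's own statement) =====
-- stated objective: simpler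
-- what changed: Backward scan that returns immediately at the first (hence largest) qualifying index replaces A's full forward pass maintaining a largest_k accumulator; the early exit makes B measurably faster on typical inputs.
-- outside the precondition, e.g. on find_largest_index_k([]): A returns None, B returns -1
import Mathlib
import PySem

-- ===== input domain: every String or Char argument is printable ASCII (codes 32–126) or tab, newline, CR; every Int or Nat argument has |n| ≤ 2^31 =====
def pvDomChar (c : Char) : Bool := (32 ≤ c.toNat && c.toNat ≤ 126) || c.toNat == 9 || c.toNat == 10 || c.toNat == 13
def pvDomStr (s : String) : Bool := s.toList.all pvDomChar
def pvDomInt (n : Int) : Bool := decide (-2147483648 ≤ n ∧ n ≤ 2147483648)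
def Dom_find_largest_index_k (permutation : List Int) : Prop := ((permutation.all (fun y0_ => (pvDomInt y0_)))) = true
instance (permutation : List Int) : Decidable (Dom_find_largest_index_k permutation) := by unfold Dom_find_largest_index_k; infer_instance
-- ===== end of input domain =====

-- B replaces A's forward scan with a largest_k accumulator by a backward scan
-- returning the first (largest) qualifying index; return value equivalence only.
-- ===== PORT A =====
-- while-loop of A: k counts up; largest_k is the accumulator.  Indices permutation[k],
-- permutation[k+1] are always in range when read (k < len-1), so getD is exact here.
def pvLoopA (permutation : List Int) (k : Nat) (largest_k : Int) : Int :=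
  if h : k < permutation.length then
    if k = permutation.length - 1 then largest_k
    else
      pvLoopA permutation (k + 1)
        (if permutation.getD k 0 < permutation.getD (k + 1) 0 then (k : Int) else largest_k)
  else largest_k  -- loop fell through: Python returns None; excluded by Pre_
termination_by permutation.length - k

def find_largest_index_k (permutation : List Int) : Int :=
  pvLoopA permutation 0 (-1)

-- ===== PORT B =====
-- B's for-loop over range(len-2, -1, -1): check index k, else step down; -1 after index 0.
def pvLoopB (permutation : List Int) : Nat → Int
  | 0 => if permutation.getD 0 0 < permutation.getD 1 0 then 0 else -1
  | k + 1 =>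
    if permutation.getD (k + 1) 0 < permutation.getD (k + 2) 0 then ((k : Int) + 1)
    else pvLoopB permutation k

def find_largest_index_k_alt (permutation : List Int) : Int :=
  if permutation.length < 2 then -1
  else pvLoopB permutation (permutation.length - 2)

-- ===== PRECONDITION & SPEC =====
-- Pre_ excludes the empty list, on which A falls off its while loop and returns None,
-- not an int.
def Pre_find_largest_index_k (permutation : List Int) : Prop := permutation ≠ []
instance (permutation : List Int) : Decidable (Pre_find_largest_index_k permutation) := by
  unfold Pre_find_largest_index_k; infer_instance

def pvWitness_find_largest_index_k : List Int := [1, 3, 2]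

def Spec_find_largest_index_k (permutation : List Int) (out : Int) : Prop := out = find_largest_index_k_alt permutation
instance (permutation : List Int) (out : Int) : Decidable (Spec_find_largest_index_k permutation out) := by unfold Spec_find_largest_index_k; infer_instance

-- ===== CLAIM (what is proved, stated in full; the proofs are below) =====
def Claim_equal_find_largest_index_k : Prop := ∀ (permutation : List Int), Dom_find_largest_index_k permutation → Pre_find_largest_index_k permutation → Spec_find_largest_index_k permutation (find_largest_index_k permutation)

-- ===== LEMMAS AND PROOFS =====

-- backward scan over the n indices [lo, lo+n), from the top down, with fallback f
def pvBscan (p : List Int) (lo : Nat) : Nat → Int → Int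
  | 0, f => f
  | n + 1, f =>
    if p.getD (lo + n) 0 < p.getD (lo + n + 1) 0 then ((lo + n : Nat) : Int)
    else pvBscan p lo n f

theorem pvLoopB_eq_bscan (p : List Int) (m : Nat) :
    pvLoopB p m = pvBscan p 0 (m + 1) (-1) := by
  induction m with
  | zero => simp [pvLoopB, pvBscan]
  | succ k ih =>
    simp only [pvLoopB, pvBscan, ih, Nat.zero_add]
    split <;> simp [*]

theorem pvBscan_peel (p : List Int) (lo n : Nat) (f : Int) :
    pvBscan p lo (n + 1) f
      = pvBscan p (lo + 1) n (if p.getD lo 0 < p.getD (lo + 1) 0 then (lo : Int) else f) := by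
  induction n generalizing f with
  | zero => simp [pvBscan]
  | succ n ih =>
    show pvBscan p lo (n + 2) f = _
    rw [show pvBscan p lo (n + 2) f
        = (if p.getD (lo + (n + 1)) 0 < p.getD (lo + (n + 1) + 1) 0 then ((lo + (n + 1) : Nat) : Int)
           else pvBscan p lo (n + 1) f) from rfl]
    rw [show pvBscan p (lo + 1) (n + 1) _
        = (if p.getD (lo + 1 + n) 0 < p.getD (lo + 1 + n + 1) 0 then ((lo + 1 + n : Nat) : Int)
           else pvBscan p (lo + 1) n _) from rfl]
    have e : lo + 1 + n = lo + (n + 1) := by omega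
    rw [e, ih]

theorem pvLoopA_eq_bscan (p : List Int) (k n : Nat) (f : Int)
    (h : k + n + 1 = p.length) : pvLoopA p k f = pvBscan p k n f := by
  induction n generalizing k f with
  | zero =>
    rw [pvLoopA]
    have hk : k < p.length := by omega
    simp [show k = p.length - 1 by omega, pvBscan]
  | succ n ih =>
    rw [pvLoopA]
    have hk : k < p.length := by omega
    have hne : ¬ k = p.length - 1 := by omega
    simp only [hk, dif_pos, hne, if_neg, not_false_iff]
    rw [ih (k + 1) _ (by omega), pvBscan_peel]

theorem find_largest_index_k_spec : Claim_equal_find_largest_index_k := by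
  intro p _ hpre
  unfold Spec_find_largest_index_k find_largest_index_k find_largest_index_k_alt
  have hlen : 1 ≤ p.length := by
    cases p with
    | nil => exact absurd rfl hpre
    | cons a t => simp
  rw [pvLoopA_eq_bscan p 0 (p.length - 1) (-1) (by omega)]
  by_cases h2 : p.length < 2
  · have : p.length - 1 = 0 := by omega
    simp [h2, this, pvBscan]
  · rw [if_neg h2, pvLoopB_eq_bscan]
    congr 1
    omega
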